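-- pv_equiv track=rewrite | github.com/adam-bouafia/Towards-Greener-Clouds-Evaluating-Hybrid-Log-Managament | src/log_provider.py | _round_robin_by
-- ===== SOURCE A (Python) =====
-- from typing import Dict, Iterable, Iterator, List, Optional
--
-- def _round_robin_by(rows: List[Dict], key: str) -> Iterator[Dict]:
--     buckets: Dict[str, List[Dict]] = {}
--     for r in rows:
--         buckets.setdefault(r.get(key, "unknown"), []).append(r)
--     iters = [iter(b) for b in buckets.values()]
--     while iters:
--         nxt = []
--         for it in iters:
--             try:
--                 yield next(it)
--                 nxt.append(it)
--             except StopIteration: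
--                 pass
--         iters = nxt
-- ===== SOURCE B (Python) =====
-- def _round_robin_by(rows, key):
--     buckets = {}
--     for r in rows:
--         buckets.setdefault(r.get(key, "unknown"), []).append(r)
--     cols = list(buckets.values())
--     if cols:
--         m = max(len(b) for b in cols)
--         for j in range(m):
--             for b in cols:
--                 if j < len(b):
--                     yield b[j]
-- ===== Notes on version B (the rewrite author's own statement) =====
-- stated objective: simpler
-- what changed: Replaces the maintain-and-rebuild list of active iterators (pruned via StopIteration each round) by a positional interleave: compute the maximum bucket length once and emit b[j] for j in range(m) with a plain bounds check, no iterator state.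
import Mathlib
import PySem

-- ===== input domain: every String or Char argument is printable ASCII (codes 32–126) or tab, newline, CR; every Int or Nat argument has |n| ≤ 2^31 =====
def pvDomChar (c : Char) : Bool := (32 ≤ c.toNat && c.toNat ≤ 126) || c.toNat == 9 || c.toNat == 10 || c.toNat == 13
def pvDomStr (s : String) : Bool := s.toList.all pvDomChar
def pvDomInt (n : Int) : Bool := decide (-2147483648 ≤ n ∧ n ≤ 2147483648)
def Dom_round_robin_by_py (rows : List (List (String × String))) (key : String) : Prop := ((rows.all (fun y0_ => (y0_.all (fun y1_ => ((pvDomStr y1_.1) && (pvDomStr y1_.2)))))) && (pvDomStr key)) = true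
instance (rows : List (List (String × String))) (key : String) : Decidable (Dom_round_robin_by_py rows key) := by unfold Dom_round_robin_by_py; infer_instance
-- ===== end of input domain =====

-- B replaces A's maintain-and-rebuild active-iterator loop by a positional interleave
-- (fixed round count = max bucket length, bounds-checked indexing); same output, simpler control flow.
-- Both Pythons are generators; the ports return the materialized list of yielded rows.

-- ===== PORT A =====

-- one pass of 'for it in iters: try: yield next(it); nxt.append(it) except StopIteration: pass'
-- returns (yielded values of this round, nxt)
def pvRoundA {α : Type} (iters : List (List α)) : List α × List (List α) :=
  match iters with
  | [] => ([], [])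
  | it :: rest =>
    let p := pvRoundA rest
    match it with
    | [] => p
    | x :: t => (x :: p.1, t :: p.2)

-- used by pvLoopA's decreasing_by
theorem pvRoundA_measure {α : Type} (iters : List (List α)) :
    ((pvRoundA iters).2.map List.length).sum + (pvRoundA iters).2.length ≤ (iters.map List.length).sum := by
  induction iters with
  | nil => simp [pvRoundA]
  | cons it rest ih =>
    cases it with
    | nil => simp [pvRoundA]; omega
    | cons x t => simp [pvRoundA]; omega

-- 'while iters: … ; iters = nxt'
def pvLoopA {α : Type} (iters : List (List α)) : List α :=
  if _h : iters = [] then []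
  else
    let p := pvRoundA iters
    p.1 ++ pvLoopA p.2
termination_by (iters.map List.length).sum + iters.length
decreasing_by
  have hm := pvRoundA_measure iters
  cases iters with
  | nil => exact absurd rfl _h
  | cons a l => simp only [List.length_cons]; omega

def round_robin_by_py (rows : List (List (String × String))) (key : String) : List (List (String × String)) :=
  let buckets : PySem.Dict String (List (List (String × String))) :=
    rows.foldl (fun d r => d.modify ((PySem.Dict.mk r).getD key "unknown") [] (fun b => b ++ [r])) PySem.Dict.empty
  pvLoopA buckets.values

-- ===== PORT B =====

def round_robin_by_py_alt (rows : List (List (String × String))) (key : String) : List (List (String × String)) :=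
  let buckets : PySem.Dict String (List (List (String × String))) :=
    rows.foldl (fun d r => d.modify ((PySem.Dict.mk r).getD key "unknown") [] (fun b => b ++ [r])) PySem.Dict.empty
  let cols := buckets.values
  if cols.isEmpty then []
  else
    let m := (cols.map List.length).foldl Nat.max 0   -- max(len(b) for b in cols), cols nonempty
    (List.range m).flatMap (fun j => cols.filterMap (fun b => b[j]?))  -- 'if j < len(b): yield b[j]'

-- ===== PRECONDITION & SPEC =====
def Spec_round_robin_by_py (rows : List (List (String × String))) (key : String) (out : List (List (String × String))) : Prop := out = round_robin_by_py_alt rows key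
instance (rows : List (List (String × String))) (key : String) (out : List (List (String × String))) : Decidable (Spec_round_robin_by_py rows key out) := by unfold Spec_round_robin_by_py; infer_instance

-- ===== CLAIM (what is proved, stated in full; the proofs are below) =====
def Claim_equal_round_robin_by_py : Prop := ∀ (rows : List (List (String × String))) (key : String), Dom_round_robin_by_py rows key → Spec_round_robin_by_py rows key (round_robin_by_py rows key)

-- ===== LEMMAS AND PROOFS =====

-- 'next(it)' on a list-modelled iterator: the tail if nonempty, exhausted otherwise
def pvTail {α : Type} (b : List α) : Option (List α) :=
  b.tail?

def pvMl {α : Type} (cols : List (List α)) : Nat := (cols.map List.length).foldl Nat.max 0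

theorem pvFoldlMax_init (l : List Nat) (a : Nat) : l.foldl Nat.max a = Nat.max a (l.foldl Nat.max 0) := by
  induction l generalizing a with
  | nil => simp
  | cons x l ih =>
    simp only [List.foldl_cons]
    rw [ih (Nat.max a x), ih (Nat.max 0 x)]
    simp [Nat.max_assoc]

theorem pvMl_cons {α : Type} (b : List α) (cols : List (List α)) :
    pvMl (b :: cols) = Nat.max b.length (pvMl cols) := by
  simp only [pvMl, List.map_cons, List.foldl_cons]
  rw [pvFoldlMax_init]
  simp

theorem pvRoundA_eq {α : Type} (iters : List (List α)) :
    pvRoundA iters = (iters.filterMap List.head?, iters.filterMap pvTail) := by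
  induction iters with
  | nil => rfl
  | cons it rest ih =>
    cases it with
    | nil => simp [pvRoundA, ih, pvTail]
    | cons x t => simp [pvRoundA, ih, pvTail]

theorem pvFilterMap_get_succ {α : Type} (cols : List (List α)) (j : Nat) :
    cols.filterMap (fun b => b[j + 1]?) = (cols.filterMap pvTail).filterMap (fun b => b[j]?) := by
  induction cols with
  | nil => rfl
  | cons b cols ih =>
    simp only [pvTail] at ih ⊢
    cases b with
    | nil => simpa using ih
    | cons x t => simp [List.filterMap_cons, ih]


theorem pvFilterMap_get_zero {α : Type} (cols : List (List α)) :
    cols.filterMap (fun b => b[0]?) = cols.filterMap List.head? := by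
  induction cols with
  | nil => rfl
  | cons b cols ih => cases b <;> simp [ih]

theorem pvMl_tails {α : Type} (cols : List (List α)) :
    pvMl (cols.filterMap pvTail) = pvMl cols - 1 := by
  induction cols with
  | nil => rfl
  | cons b cols ih =>
    simp only [pvTail] at ih
    cases b with
    | nil => rw [pvMl_cons]; simpa [pvTail] using ih
    | cons x t =>
      simp only [List.filterMap_cons, pvTail, List.tail?_cons]
      rw [pvMl_cons, pvMl_cons, ih]
      simp only [List.length_cons]
      simp only [Nat.max_def]
      split_ifs <;> omega

theorem pvMl_zero_all_nil {α : Type} (cols : List (List α)) (h : pvMl cols = 0) :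
    ∀ b ∈ cols, b = [] := by
  induction cols with
  | nil => simp
  | cons b cols ih =>
    rw [pvMl_cons] at h
    rcases Nat.max_eq_zero_iff.mp h with ⟨h1, h2⟩
    intro c hc
    rcases List.mem_cons.mp hc with hc | hc
    · subst hc; exact List.eq_nil_of_length_eq_zero h1
    · exact ih h2 c hc

theorem pvTails_ne_nil {α : Type} (cols : List (List α)) (h : pvMl cols ≠ 0) :
    cols.filterMap pvTail ≠ [] := by
  induction cols with
  | nil => simp [pvMl] at h
  | cons b cols ih =>
    rw [pvMl_cons] at h
    cases b with
    | nil =>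
      simp only [List.filterMap_cons, pvTail, List.tail?_nil]
      exact ih (by simpa [Nat.zero_max] using h)
    | cons x t => simp [pvTail]

theorem pvAllNil_filterMap_head {α : Type} (cols : List (List α)) (h : ∀ b ∈ cols, b = []) :
    cols.filterMap List.head? = [] := by
  induction cols with
  | nil => rfl
  | cons b cols ih =>
    have hb := h b (by simp)
    subst hb
    simpa using ih (fun c hc => h c (by simp [hc]))

theorem pvAllNil_filterMap_tail {α : Type} (cols : List (List α)) (h : ∀ b ∈ cols, b = []) :
    cols.filterMap pvTail = [] := by
  induction cols with
  | nil => rfl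
  | cons b cols ih =>
    have hb := h b (by simp)
    subst hb
    simpa [pvTail] using ih (fun c hc => h c (by simp [hc]))

theorem pvLoopA_eq_interleave {α : Type} (n : Nat) (cols : List (List α)) (hn : pvMl cols = n) :
    pvLoopA cols =
      if cols = [] then []
      else (List.range (pvMl cols)).flatMap (fun j => cols.filterMap (fun b => b[j]?)) := by
  induction n generalizing cols with
  | zero =>
    by_cases hc : cols = []
    · simp [hc, pvLoopA]
    · have hall := pvMl_zero_all_nil cols hn
      rw [pvLoopA]
      simp only [hc, dite_false, pvRoundA_eq]
      rw [pvAllNil_filterMap_head cols hall, pvAllNil_filterMap_tail cols hall]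
      simp [pvLoopA, hn]
  | succ k ih =>
    have hc : cols ≠ [] := by rintro rfl; simp [pvMl] at hn
    have htne : cols.filterMap pvTail ≠ [] := pvTails_ne_nil cols (by omega)
    have htk : pvMl (cols.filterMap pvTail) = k := by rw [pvMl_tails, hn]; omega
    rw [pvLoopA]
    simp only [hc, dite_false, pvRoundA_eq]
    rw [ih (cols.filterMap pvTail) htk, if_neg htne, htk, hn,
      List.range_succ_eq_map, List.flatMap_cons, List.flatMap_map]
    rw [pvFilterMap_get_zero]
    congr 1
    apply List.flatMap_congr
    intro j _
    exact (pvFilterMap_get_succ cols j).symm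

-- ===== VERDICT (by name: the statement is the Claim_ definition above) =====
theorem round_robin_by_py_spec : Claim_equal_round_robin_by_py := by
  intro rows key _
  unfold Spec_round_robin_by_py round_robin_by_py round_robin_by_py_alt
  rw [pvLoopA_eq_interleave (pvMl _) _ rfl]
  simp only [List.isEmpty_iff, pvMl]
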